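-- pv_equiv track=rewrite | github.com/jabibo/wordbattle-backend | app/game_logic/full_points.py | get_word_horizontal
-- ===== SOURCE A (Python) =====
-- from typing import List, Tuple, Dict, Optional, Set
--
-- def get_word_horizontal(board: List[List[Optional[str]]], row: int, col: int) -> Tuple[str, List[Tuple[int,int]]]:
--     start = col
--     while start > 0 and board[row][start-1] not in (None, "", " "):
--         start -= 1
--     end = col
--     while end < len(board[0])-1 and board[row][end+1] not in (None, "", " "):
--         end += 1
--     word = ''.join(board[row][c] for c in range(start, end+1) if board[row][c])
--     coords = [(row, c) for c in range(start, end+1) if board[row][c]]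
--     return word, coords
-- ===== SOURCE B (Python) =====
-- from typing import List, Tuple, Optional
--
-- def _runtable(vals):
--     # t[i] = length of the run of consecutive filled cells ending just before index i
--     t = [0]
--     for v in vals:
--         t.append(t[-1] + 1 if v not in (None, "", " ") else 0)
--     return t
--
-- def get_word_horizontal(board: List[List[Optional[str]]], row: int, col: int) -> Tuple[str, List[Tuple[int, int]]]:
--     cells = board[row]
--     width = len(board[0])
--     left = _runtable(cells[:width])
--     right = _runtable(list(reversed(cells[:width])))
--     start = col - left[col]
--     end = col + right[width - 1 - col]
--     seg = cells[start:end + 1]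
--     word = ''.join(v for v in seg if v)
--     coords = [(row, start + i) for i, v in enumerate(seg) if v]
--     return word, coords
-- ===== Notes on version B (the rewrite author's own statement) =====
-- stated objective: alternative
-- what changed: Replaces A's two outward-expanding while loops around (row,col) with precomputed run-length tables (one forward pass, one over the reversed row) from which start/end fall out arithmetically, then a slice plus enumerate to build the word and coordinates.
-- outside the precondition, e.g. on get_word_horizontal([['a']], 0, -1): A returns ('aa', [(0, -1), (0, 0)]), B returns ('a', [(0, -2)])
import Mathlib
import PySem

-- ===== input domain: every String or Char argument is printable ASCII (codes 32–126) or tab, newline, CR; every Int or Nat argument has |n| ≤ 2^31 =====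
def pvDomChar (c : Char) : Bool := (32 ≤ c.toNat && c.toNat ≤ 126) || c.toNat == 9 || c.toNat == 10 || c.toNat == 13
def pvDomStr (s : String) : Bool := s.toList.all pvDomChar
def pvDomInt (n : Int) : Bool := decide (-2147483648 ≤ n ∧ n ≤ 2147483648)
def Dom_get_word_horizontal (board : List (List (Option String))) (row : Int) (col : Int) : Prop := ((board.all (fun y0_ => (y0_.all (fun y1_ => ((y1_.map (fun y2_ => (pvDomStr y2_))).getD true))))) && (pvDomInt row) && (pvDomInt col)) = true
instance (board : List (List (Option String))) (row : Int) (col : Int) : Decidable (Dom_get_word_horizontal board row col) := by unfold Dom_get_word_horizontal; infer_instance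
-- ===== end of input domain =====

-- B replaces A's two outward-expanding while loops by precomputed run-length tables (one forward, one on the
-- reversed row) plus arithmetic and a slice; same return value on the stated domain, objective: alternative.

-- ===== PORT A =====

-- board[row][i], with out-of-range read as an empty cell (Python raises there; Pre_ excludes those inputs)
def pvCell (cells : List (Option String)) (i : Int) : Option String :=
  (PySem.List.pyGet? cells i).getD none

-- `v not in (None, "", " ")`
def pvFilled (v : Option String) : Bool :=
  !(v == none || v == some "" || v == some " ")

-- truthiness of a cell: `if board[row][c]`
def pvTruthy (v : Option String) : Bool :=
  match v with
  | none => false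
  | some s => !(s == "")

-- `while start > 0 and board[row][start-1] not in (None, "", " "): start -= 1`
-- (fuel = start.toNat, an upper bound on the iterations: each one decrements start and needs start > 0)
def pvStartAux (cells : List (Option String)) : Nat → Int → Int
  | 0, start => start
  | fuel + 1, start =>
    if start > 0 ∧ pvFilled (pvCell cells (start - 1)) then pvStartAux cells fuel (start - 1) else start

def pvStartA (cells : List (Option String)) (start : Int) : Int :=
  pvStartAux cells start.toNat start

-- `while end < len(board[0])-1 and board[row][end+1] not in (None, "", " "): end += 1`
-- (fuel = (width-1-e).toNat, an upper bound on the iterations: each one increments e and needs e < width-1)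
def pvEndAux (cells : List (Option String)) (width : Int) : Nat → Int → Int
  | 0, e => e
  | fuel + 1, e =>
    if e < width - 1 ∧ pvFilled (pvCell cells (e + 1)) then pvEndAux cells width fuel (e + 1) else e

def pvEndA (cells : List (Option String)) (width : Int) (e : Int) : Int :=
  pvEndAux cells width (width - 1 - e).toNat e

def get_word_horizontal (board : List (List (Option String))) (row : Int) (col : Int) : String × (List (Int × Int)) :=
  let cells := (PySem.List.pyGet? board row).getD []
  let width : Int := ((PySem.List.pyGet? board 0).getD []).length
  let start := pvStartA cells col
  let e := pvEndA cells width col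
  let word := PySem.Str.join ""
    (((PySem.List.pyRange start (e + 1) 1).filter (fun c => pvTruthy (pvCell cells c))).map
      (fun c => (pvCell cells c).getD ""))
  let coords := ((PySem.List.pyRange start (e + 1) 1).filter (fun c => pvTruthy (pvCell cells c))).map
      (fun c => ((row, c) : Int × Int))
  (word, coords)

-- ===== PORT B =====

-- t = [0]; for v in vals: t.append(t[-1] + 1 if v not in (None, "", " ") else 0)
def pvRuntable (vals : List (Option String)) : List Int :=
  vals.foldl (fun t v => t ++ [if pvFilled v then PySem.List.pyGetD t (-1) 0 + 1 else 0]) [0]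

def get_word_horizontal_alt (board : List (List (Option String))) (row : Int) (col : Int) : String × (List (Int × Int)) :=
  let cells := (PySem.List.pyGet? board row).getD []
  let width : Int := ((PySem.List.pyGet? board 0).getD []).length
  let cw := PySem.List.slice cells none (some width)                 -- cells[:width]
  let left := pvRuntable cw
  let right := pvRuntable cw.reverse                                 -- list(reversed(cells[:width]))
  let start := col - PySem.List.pyGetD left col 0
  let e := col + PySem.List.pyGetD right (width - 1 - col) 0
  let seg := PySem.List.slice cells (some start) (some (e + 1))      -- cells[start:end+1]
  let word := PySem.Str.join "" ((seg.filter pvTruthy).map (fun v => v.getD ""))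
  let coords := ((PySem.List.enumerate seg 0).filter (fun p => pvTruthy p.2)).map
      (fun p => ((row, start + p.1) : Int × Int))
  (word, coords)

-- ===== PRECONDITION & SPEC =====
-- Pre_ = the inputs where every index A touches is a plain in-range lookup: board[row] exists (Python's
-- index rule, so a negative in-range row is allowed), 0 ≤ col < len(board[0]), and row's list is at least
-- len(board[0]) long (rows may be ragged as long as the scanned row covers the scanned range).  Outside it
-- A either raises IndexError or (for a negative col / a scan running into a short row) returns values
-- produced by Python's negative-index wraparound, an accident of the implementation rather than a board lookup.
def Pre_get_word_horizontal (board : List (List (Option String))) (row : Int) (col : Int) : Prop :=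
  PySem.Raise.InRange board.length row ∧ 0 ≤ col ∧ col < ((board.headD []).length : Int) ∧
    (board.headD []).length ≤ ((PySem.List.pyGet? board row).getD []).length
instance (board : List (List (Option String))) (row : Int) (col : Int) : Decidable (Pre_get_word_horizontal board row col) := by unfold Pre_get_word_horizontal; infer_instance

def pvWitness_get_word_horizontal : List (List (Option String)) × Int × Int :=
  ([[some "C", some "A", some "T"], [none, some " ", some ""]], 0, 1)

def Spec_get_word_horizontal (board : List (List (Option String))) (row : Int) (col : Int) (out : String × (List (Int × Int))) : Prop := out = get_word_horizontal_alt board row col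
instance (board : List (List (Option String))) (row : Int) (col : Int) (out : String × (List (Int × Int))) : Decidable (Spec_get_word_horizontal board row col out) := by unfold Spec_get_word_horizontal; infer_instance

-- ===== CLAIM (what is proved, stated in full; the proofs are below) =====
def Claim_equal_get_word_horizontal : Prop := ∀ (board : List (List (Option String))) (row : Int) (col : Int), Dom_get_word_horizontal board row col → Pre_get_word_horizontal board row col → Spec_get_word_horizontal board row col (get_word_horizontal board row col)


-- ===== LEMMAS AND PROOFS =====

-- run-length count: pvCnt vals k = value of B's run table at index k
def pvCnt (vals : List (Option String)) : Nat → Int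
  | 0 => 0
  | k+1 => if pvFilled (vals.getD k none) then pvCnt vals k + 1 else 0

theorem pvCnt_nonneg (vals : List (Option String)) (k : Nat) : 0 ≤ pvCnt vals k := by
  induction k with
  | zero => simp [pvCnt]
  | succ k ih => simp only [pvCnt]; split <;> omega

theorem pvCnt_le (vals : List (Option String)) (k : Nat) : pvCnt vals k ≤ (k : Int) := by
  induction k with
  | zero => simp [pvCnt]
  | succ k ih => simp only [pvCnt]; split <;> push_cast <;> omega

theorem pvCnt_append (vs : List (Option String)) (v : Option String) (k : Nat)
    (hk : k ≤ vs.length) : pvCnt (vs ++ [v]) k = pvCnt vs k := by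
  induction k with
  | zero => rfl
  | succ k ih =>
    simp only [pvCnt]
    rw [List.getD_append vs [v] none k (by omega), ih (by omega)]

theorem pvRuntable_eq (vals : List (Option String)) :
    pvRuntable vals = (List.range (vals.length + 1)).map (fun k => pvCnt vals k) := by
  induction vals using List.reverseRecOn with
  | nil => rfl
  | append_singleton vs v ih =>
    unfold pvRuntable at *
    rw [List.foldl_append]
    simp only [List.foldl_cons, List.foldl_nil]
    rw [ih]
    have hx : PySem.List.pyGetD (List.map (fun k => pvCnt vs k) (List.range (vs.length + 1))) (-1) 0
        = pvCnt vs vs.length := by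
      rw [PySem.List.pyGetD_neg_one _ _ (by simp), List.getLast_eq_getElem]
      simp
    rw [hx]
    have hR : (List.range ((vs ++ [v]).length + 1)).map (fun k => pvCnt (vs ++ [v]) k)
        = (List.range (vs.length + 1)).map (fun k => pvCnt (vs ++ [v]) k)
          ++ [pvCnt (vs ++ [v]) (vs.length + 1)] := by
      have h1 : (vs ++ [v]).length + 1 = (vs.length + 1) + 1 := by simp
      rw [h1, List.range_succ, List.map_append, List.map_singleton]
    rw [hR]
    congr 1
    · exact (List.map_congr_left (fun k hk => by
        exact (pvCnt_append vs v k (by simpa using Nat.lt_succ_iff.mp (List.mem_range.mp hk))).symm))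
    · simp only [pvCnt]
      have h2 : (vs ++ [v]).getD vs.length none = v := by
        rw [List.getD_eq_getElem?_getD, List.getElem?_append_right (by omega)]
        simp
      rw [h2, pvCnt_append vs v vs.length (le_refl _)]

theorem pvStartAux_eq (cells : List (Option String)) (k : Nat) :
    pvStartAux cells k (k : Int) = (k : Int) - pvCnt cells k := by
  induction k with
  | zero => simp [pvStartAux, pvCnt]
  | succ k ih =>
    have hcell : pvCell cells (((k + 1 : Nat) : Int) - 1) = cells.getD k none := by
      have h2 : (((k + 1 : Nat)) : Int) - 1 = ((k : Nat) : Int) := by push_cast; ring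
      rw [h2]
      simp only [pvCell, PySem.List.pyGet?_natCast]
      rw [List.getD_eq_getElem?_getD]
    have h1 : (((k + 1 : Nat)) : Int) - 1 = ((k : Nat) : Int) := by push_cast; ring
    simp only [pvStartAux]
    by_cases hf : pvFilled (cells.getD k none)
    · rw [if_pos (⟨by push_cast; omega, by rw [hcell]; exact hf⟩ : _ ∧ _)]
      rw [h1, ih]
      simp only [pvCnt]
      rw [if_pos hf]
      omega
    · rw [if_neg (by rintro ⟨-, h2⟩; rw [hcell] at h2; exact hf h2)]
      simp only [pvCnt]
      rw [if_neg hf]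
      omega

theorem pvStartA_eq (cells : List (Option String)) (k : Nat) :
    pvStartA cells (k : Int) = (k : Int) - pvCnt cells k := by
  unfold pvStartA
  rw [show ((k : Int)).toNat = k by omega]
  exact pvStartAux_eq cells k

theorem pvCnt_take (cells : List (Option String)) (n : Nat) (k : Nat) (hk : k ≤ n) :
    pvCnt (cells.take n) k = pvCnt cells k := by
  induction k with
  | zero => rfl
  | succ k ih =>
    simp only [pvCnt]
    rw [List.getD_eq_getElem?_getD, List.getD_eq_getElem?_getD,
      List.getElem?_take_of_lt (by omega), ih (by omega)]

theorem pvEndAux_eq (cells : List (Option String)) (w : Nat) (hw : w ≤ cells.length) (m : Nat) :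
    ∀ (k : Nat), w = k + m + 1 →
    pvEndAux cells (w : Int) m (k : Int) = (k : Int) + pvCnt (cells.take w).reverse m := by
  induction m with
  | zero =>
    intro k hlen
    simp [pvEndAux, pvCnt]
  | succ m ih =>
    intro k hlen
    have htw : (cells.take w).length = w := by
      rw [List.length_take, Nat.min_eq_left hw]
    have hrev : (cells.take w).reverse.getD m none = cells.getD (k+1) none := by
      rw [List.getD_eq_getElem?_getD, List.getD_eq_getElem?_getD,
        List.getElem?_reverse (by omega), htw,
        show w - 1 - m = k + 1 by omega, List.getElem?_take_of_lt (by omega)]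
    have hcell : pvCell cells ((k : Int) + 1) = cells.getD (k+1) none := by
      simp only [pvCell]
      rw [PySem.List.pyGet?_of_nonneg cells (show (0:Int) ≤ (k:Int)+1 by omega)]
      have h3 : ((k : Int) + 1).toNat = k + 1 := by omega
      rw [h3, List.getD_eq_getElem?_getD]
    simp only [pvEndAux]
    by_cases hf : pvFilled (cells.getD (k+1) none)
    · rw [if_pos (⟨by omega, by rw [hcell]; exact hf⟩ : _ ∧ _)]
      have h4 : (k : Int) + 1 = ((k + 1 : Nat) : Int) := by push_cast; ring
      rw [h4, ih (k+1) (by omega)]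
      simp only [pvCnt]
      rw [hrev, if_pos hf]
      omega
    · rw [if_neg (by rintro ⟨-, h2⟩; rw [hcell] at h2; exact hf h2)]
      simp only [pvCnt]
      rw [hrev, if_neg hf]
      omega

theorem pvEndA_fuel (cells : List (Option String)) (w : Nat) (hw : w ≤ cells.length)
    (m k : Nat) (hlen : w = k + m + 1) :
    pvEndA cells (w : Int) (k : Int) = (k : Int) + pvCnt (cells.take w).reverse m := by
  unfold pvEndA
  rw [show ((w : Int) - 1 - (k : Int)).toNat = m by omega]
  exact pvEndAux_eq cells w hw m k hlen

theorem pvSeg_eq (cells : List (Option String)) (s t : Nat) (hst : s ≤ t)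
    (htn : t ≤ cells.length) :
    PySem.List.slice cells (some (s : Int)) (some (t : Int))
      = (PySem.List.pyRange (s : Int) (t : Int) 1).map (fun i => pvCell cells i) := by
  rw [PySem.List.slice_natCast, PySem.List.pyRange_one, List.map_map]
  have hts : ((t : Int) - (s : Int)).toNat = t - s := by omega
  rw [hts]
  apply List.ext_getElem
  · simp; omega
  · intro i h1 h2
    simp only [List.getElem_take, List.getElem_drop, List.getElem_map, List.getElem_range,
      Function.comp]
    have hi : s + i < cells.length := by simp at h1; omega
    simp only [pvCell]
    have : (s : Int) + (i : Int) = ((s + i : Nat) : Int) := by push_cast; ring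
    rw [this, PySem.List.pyGet?_natCast, List.getElem?_eq_getElem hi]
    rfl

theorem pvCoordsAux (f : Int → Option String) (row s : Int) (m : Nat) : ∀ (a : Int),
    ((PySem.List.enumerate ((PySem.List.pyRange (s + a) (s + a + (m : Int)) 1).map f) a).filter
        (fun p => pvTruthy p.2)).map (fun p => ((row, s + p.1) : Int × Int))
    = ((PySem.List.pyRange (s + a) (s + a + (m : Int)) 1).filter
        (fun c => pvTruthy (f c))).map (fun c => ((row, c) : Int × Int)) := by
  induction m with
  | zero =>
    intro a
    rw [PySem.List.pyRange_one_eq_nil (by omega)]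
    rfl
  | succ m ih =>
    intro a
    rw [PySem.List.pyRange_one_cons (by push_cast; omega)]
    simp only [List.map_cons, PySem.List.enumerate_cons, List.filter_cons]
    have harg : s + a + 1 = s + (a + 1) := by ring
    have harg2 : s + a + ((m : Nat) + 1 : Nat) = s + (a + 1) + (m : Int) := by push_cast; ring
    rw [harg, harg2]
    by_cases hf : pvTruthy (f (s + a))
    · rw [if_pos hf, if_pos hf, List.map_cons, List.map_cons, ih (a + 1)]
    · rw [if_neg hf, if_neg hf, ih (a + 1)]

-- `word`: the two filter/map pipelines compute the same list of strings
theorem pvWord_eq (f : Int → Option String) (R : List Int) :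
    ((R.map f).filter pvTruthy).map (fun v => v.getD "")
      = ((R.filter (fun c => pvTruthy (f c))).map (fun c => (f c).getD "")) := by
  rw [List.filter_map, List.map_map]
  rfl

-- ===== VERDICT (by name: the statement is the Claim_ definition above) =====
theorem get_word_horizontal_spec : Claim_equal_get_word_horizontal := by
  intro board row col hDom hPre
  obtain ⟨hrin, hc0, hclt, hrag⟩ := hPre
  unfold Spec_get_word_horizontal
  obtain ⟨C, rfl⟩ : ∃ c : Nat, col = (c : Int) := ⟨col.toNat, (Int.toNat_of_nonneg hc0).symm⟩
  set n := (board.headD []).length with hn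
  have hC : C < n := by exact_mod_cast hclt
  obtain ⟨cells, hcells⟩ : ∃ cells, PySem.List.pyGet? board row = some cells := by
    cases h : PySem.List.pyGet? board row with
    | none => exact absurd hrin ((PySem.List.pyGet?_eq_none_iff board row).mp h)
    | some v => exact ⟨v, rfl⟩
  have hne : board ≠ [] := by
    rintro rfl
    rw [show PySem.List.pyGet? ([] : List (List (Option String))) row = none from
      (PySem.List.pyGet?_eq_none_iff [] row).mpr (by simp [PySem.Raise.InRange])] at hcells
    simp at hcells
  have hhead : PySem.List.pyGet? board 0 = some (board.headD []) := by
    rw [PySem.List.pyGet?_zero]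
    cases board with
    | nil => exact absurd rfl hne
    | cons a t => rfl
  have hnlen : n ≤ cells.length := by
    rw [hcells] at hrag
    exact hrag
  have hstart : pvStartA cells (C : Int) = (C : Int) - pvCnt cells C := pvStartA_eq cells C
  have hend : pvEndA cells (n : Int) (C : Int)
      = (C : Int) + pvCnt (cells.take n).reverse (n - 1 - C) :=
    pvEndA_fuel cells n hnlen (n - 1 - C) C (by omega)
  have hcw : PySem.List.slice cells none (some (n : Int)) = cells.take n :=
    PySem.List.slice_to_natCast cells n
  have htw : (cells.take n).length = n := by
    rw [List.length_take, Nat.min_eq_left hnlen]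
  have hleft : PySem.List.pyGetD (pvRuntable (cells.take n)) (C : Int) 0 = pvCnt cells C := by
    rw [PySem.List.pyGetD_natCast, pvRuntable_eq, htw]
    rw [PySem.List.getD_map_range _ _ _ _ (by omega)]
    exact pvCnt_take cells n C (by omega)
  have hcast : (n : Int) - 1 - (C : Int) = ((n - 1 - C : Nat) : Int) := by omega
  have hright : PySem.List.pyGetD (pvRuntable (cells.take n).reverse) ((n : Int) - 1 - (C : Int)) 0
      = pvCnt (cells.take n).reverse (n - 1 - C) := by
    rw [hcast, PySem.List.pyGetD_natCast, pvRuntable_eq]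
    have hlr : (cells.take n).reverse.length = n := by simp [htw]
    rw [hlr]
    exact PySem.List.getD_map_range _ _ _ _ (by omega)
  have hb0 := pvCnt_nonneg cells C
  have hb1 := pvCnt_le cells C
  have hb2 := pvCnt_nonneg (cells.take n).reverse (n - 1 - C)
  have hb3 := pvCnt_le (cells.take n).reverse (n - 1 - C)
  obtain ⟨s, hs⟩ : ∃ s : Nat, (C : Int) - pvCnt cells C = (s : Int) :=
    ⟨((C : Int) - pvCnt cells C).toNat, by omega⟩
  obtain ⟨t, ht⟩ : ∃ t : Nat, (C : Int) + pvCnt (cells.take n).reverse (n - 1 - C) + 1 = (t : Int) :=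
    ⟨((C : Int) + pvCnt (cells.take n).reverse (n - 1 - C) + 1).toNat, by omega⟩
  have hst : s ≤ t := by omega
  have htn : t ≤ cells.length := by omega
  have hseg := pvSeg_eq cells s t hst htn
  have hco := pvCoordsAux (fun i => pvCell cells i) row (s : Int) (t - s) 0
  rw [show ((s : Int) + (0 : Int)) = (s : Int) by ring] at hco
  rw [show ((s : Int) + ((t - s : Nat) : Int)) = (t : Int) by omega] at hco
  simp only [get_word_horizontal, get_word_horizontal_alt, hcells, hhead, Option.getD_some,
    ← hn, hcw, hstart, hend, hleft, hright, hs, ht, hseg, hco, pvWord_eq]
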